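-- pv_equiv track=rewrite | github.com/timainge/iobox | src/iobox/providers/microsoft_auth.py | get_microsoft_scopes
-- ===== SOURCE A (Python) =====
-- def get_microsoft_scopes(services: list[str], mode: str) -> list[str]:
--     """Build combined Microsoft scope list for given services and mode.
--
--     Args:
--         services: Subset of ``["messages", "calendar", "drive"]``.
--         mode: ``"readonly"`` or ``"standard"`` (dangerous treated as standard).
--
--     Returns:
--         Deduplicated list of Microsoft Graph scope strings.
--     """
--     scopes: list[str] = ["basic"]
--     if "messages" in services:
--         if mode == "readonly":
--             scopes.append("Mail.Read")
--         else:
--             scopes.extend(["Mail.ReadWrite", "Mail.Send"])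
--     if "calendar" in services:
--         if mode == "readonly":
--             scopes.append("Calendars.Read")
--         else:
--             scopes.append("Calendars.ReadWrite")
--     if "drive" in services:
--         if mode == "readonly":
--             scopes.append("Files.Read.All")
--         else:
--             scopes.append("Files.ReadWrite.All")
--     # Preserve order, remove duplicates
--     seen: set[str] = set()
--     result: list[str] = []
--     for s in scopes:
--         if s not in seen:
--             seen.add(s)
--             result.append(s)
--     return result
-- ===== SOURCE B (Python) =====
-- _UNIVERSE = [
--     ("basic", None, None),
--     ("Mail.Read", "messages", True),
--     ("Mail.ReadWrite", "messages", False),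
--     ("Mail.Send", "messages", False),
--     ("Calendars.Read", "calendar", True),
--     ("Calendars.ReadWrite", "calendar", False),
--     ("Files.Read.All", "drive", True),
--     ("Files.ReadWrite.All", "drive", False),
-- ]
--
-- def get_microsoft_scopes(services: list[str], mode: str) -> list[str]:
--     """Select from the fixed ordered universe of all scopes; no build/dedup passes."""
--     ro = (mode == "readonly")
--     return [scope for scope, svc, needs_ro in _UNIVERSE
--             if svc is None or (svc in services and needs_ro == ro)]
-- ===== Notes on version B (the rewrite author's own statement) =====
-- stated objective: alternative
-- what changed: B selects by filtering a fixed ordered universe of (scope, service, readonly-flag) entries with one predicate, instead of A's staged build (three conditional append blocks) followed by an ordered-dedup pass; B needs no dedup because the universe entries are distinct.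
import Mathlib
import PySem

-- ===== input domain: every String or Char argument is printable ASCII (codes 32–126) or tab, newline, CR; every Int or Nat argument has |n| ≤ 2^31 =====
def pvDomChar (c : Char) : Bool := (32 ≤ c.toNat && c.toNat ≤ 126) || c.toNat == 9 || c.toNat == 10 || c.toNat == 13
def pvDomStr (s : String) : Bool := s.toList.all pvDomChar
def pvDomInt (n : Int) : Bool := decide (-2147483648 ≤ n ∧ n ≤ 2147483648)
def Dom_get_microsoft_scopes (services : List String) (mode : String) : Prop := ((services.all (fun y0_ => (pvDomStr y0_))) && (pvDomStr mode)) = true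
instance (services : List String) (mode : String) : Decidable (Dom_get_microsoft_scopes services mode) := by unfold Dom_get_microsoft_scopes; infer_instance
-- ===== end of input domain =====

-- ===== PORT A =====
-- B filters a fixed ordered universe of scope entries with one predicate instead of A's staged build + dedup pass (alternative decomposition, same cost).
def get_microsoft_scopes (services : List String) (mode : String) : List String :=
  let scopes : List String := ["basic"]
  let scopes := if services.contains "messages" then
      (if mode == "readonly" then scopes ++ ["Mail.Read"]
       else scopes ++ ["Mail.ReadWrite", "Mail.Send"])
    else scopes
  let scopes := if services.contains "calendar" then
      (if mode == "readonly" then scopes ++ ["Calendars.Read"]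
       else scopes ++ ["Calendars.ReadWrite"])
    else scopes
  let scopes := if services.contains "drive" then
      (if mode == "readonly" then scopes ++ ["Files.Read.All"]
       else scopes ++ ["Files.ReadWrite.All"])
    else scopes
  -- Preserve order, remove duplicates
  (scopes.foldl (fun (st : PySem.Set String × List String) s =>
      if PySem.Set.contains st.1 s then st
      else (PySem.Set.add st.1 s, st.2 ++ [s]))
    (PySem.Set.empty, [])).2

-- ===== PORT B =====
def msScopeUniverse : List (String × Option String × Bool) :=
  [("basic", none, false),
   ("Mail.Read", some "messages", true),
   ("Mail.ReadWrite", some "messages", false),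
   ("Mail.Send", some "messages", false),
   ("Calendars.Read", some "calendar", true),
   ("Calendars.ReadWrite", some "calendar", false),
   ("Files.Read.All", some "drive", true),
   ("Files.ReadWrite.All", some "drive", false)]

def get_microsoft_scopes_alt (services : List String) (mode : String) : List String :=
  let ro := mode == "readonly"
  msScopeUniverse.filterMap (fun row =>
    match row with
    | (scope, svc, needsRo) =>
      if (match svc with
          | none => true
          | some s => services.contains s && needsRo == ro) then some scope else none)

-- ===== PRECONDITION & SPEC =====
def Spec_get_microsoft_scopes (services : List String) (mode : String) (out : List String) : Prop := out = get_microsoft_scopes_alt services mode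
instance (services : List String) (mode : String) (out : List String) : Decidable (Spec_get_microsoft_scopes services mode out) := by unfold Spec_get_microsoft_scopes; infer_instance

-- ===== CLAIM (what is proved, stated in full; the proofs are below) =====
def Claim_equal_get_microsoft_scopes : Prop := ∀ (services : List String) (mode : String), Dom_get_microsoft_scopes services mode → Spec_get_microsoft_scopes services mode (get_microsoft_scopes services mode)

-- ===== LEMMAS AND PROOFS =====

-- ===== VERDICT (by name: the statement is the Claim_ definition above) =====
theorem get_microsoft_scopes_spec : Claim_equal_get_microsoft_scopes := by
  intro services mode _
  unfold Spec_get_microsoft_scopes get_microsoft_scopes get_microsoft_scopes_alt msScopeUniverse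
  by_cases h1 : "messages" ∈ services <;>
  by_cases h2 : "calendar" ∈ services <;>
  by_cases h3 : "drive" ∈ services <;>
  by_cases hm : (mode == "readonly") = true <;>
    simp [List.contains_eq_mem, h1, h2, h3, hm, PySem.Set.contains, PySem.Set.add,
      PySem.Set.empty, List.filterMap, List.foldl]
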